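-- pv_equiv track=rewrite | github.com/mahrin/INF250ImageProcessing | LAB_codes/L09 multivariate/Assignment03_spider.py | find_bands
-- ===== SOURCE A (Python) =====
-- def find_bands(all_wavelengths,required_wavelengths):
--     required_bands = {}
--
--     for wavelength in required_wavelengths.keys():
--             min_distance = None
--             min_wave_val = None
--             band = None
--             for index, wave_val in enumerate(all_wavelengths):
--                 current_distance = abs(wavelength - wave_val)
--                 if min_distance == None:
--                     min_distance = current_distance
--                     min_wave_val = wave_val
--                     band = index+1
--                 elif current_distance> min_distance:
--                     break
--                 elif current_distance< min_distance:
--                     min_distance = current_distance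
--                     min_wave_val = wave_val
--                     band = index +1
--
--             band_name = required_wavelengths[wavelength]
--             required_bands[band_name]=band
--     return required_bands
-- ===== SOURCE B (Python) =====
-- def find_bands(all_wavelengths, required_wavelengths):
--     # NOTE: like A, this stops scanning at the first strict rise of the distance
--     # above the running minimum (A assumes a sorted wavelength axis); the band is
--     # then recovered as the position of the minimum over the scanned prefix.
--     result = {}
--     n = len(all_wavelengths)
--     for wavelength, band_name in required_wavelengths.items():
--         # phase 1: cut index = first position whose distance strictly exceeds
--         # the running minimum of the earlier distances
--         k, run = n, (abs(wavelength - all_wavelengths[0]) if all_wavelengths else 0)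
--         for i in range(1, n):
--             d = abs(wavelength - all_wavelengths[i])
--             if d > run:
--                 k = i
--                 break
--             if d < run:
--                 run = d
--         # phase 2: band = first position of the minimal distance in the prefix
--         head = [abs(wavelength - w) for w in all_wavelengths[:k]]
--         result[band_name] = head.index(min(head)) + 1 if head else None
--     return result
-- ===== Notes on version B (the rewrite author's own statement) =====
-- stated objective: alternative
-- what changed: B replaces A's single stateful loop (tracking min_distance and band with three branches and a break) by three phases per query: build the distance list, find the cut index at the first strict rise above the running minimum, then take band = first position of the minimal distance in that prefix; bisect per the hint would change results on unsorted wavelength lists, so the early-stop scan semantics is kept.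
import Mathlib
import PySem

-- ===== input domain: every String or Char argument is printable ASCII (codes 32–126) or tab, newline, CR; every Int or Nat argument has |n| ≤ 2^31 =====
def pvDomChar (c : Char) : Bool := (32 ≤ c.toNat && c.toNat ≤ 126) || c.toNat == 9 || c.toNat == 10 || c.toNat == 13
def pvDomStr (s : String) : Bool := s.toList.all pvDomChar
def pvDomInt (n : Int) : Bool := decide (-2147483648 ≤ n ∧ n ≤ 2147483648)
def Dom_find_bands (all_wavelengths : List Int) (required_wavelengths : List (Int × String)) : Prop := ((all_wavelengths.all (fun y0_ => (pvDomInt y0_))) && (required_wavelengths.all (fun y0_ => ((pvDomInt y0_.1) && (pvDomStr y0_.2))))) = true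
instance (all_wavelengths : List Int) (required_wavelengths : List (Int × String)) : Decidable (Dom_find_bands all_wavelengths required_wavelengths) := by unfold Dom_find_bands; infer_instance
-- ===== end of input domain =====

-- B keeps A's early-stopping scan semantics but decomposes each query into three
-- phases (distance list, cut index, first position of the minimum) instead of
-- A's single stateful loop; same asymptotic cost (objective: alternative).

-- ===== PORT A =====
-- inner 'for index, wave_val in enumerate(all_wavelengths)' loop with its break,
-- state = (min_distance, band); min_wave_val is assigned but never read, so it is
-- not tracked.
def pvAScan (q : Int) : List Int → Nat → Option Int → Option Int → Option Int
  | [], _, _, band => band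
  | wave_val :: rest, index, min_distance, band =>
    let current_distance := |q - wave_val|
    match min_distance with
    | none => pvAScan q rest (index + 1) (some current_distance) (some ((index : Int) + 1))
    | some md =>
      if current_distance > md then band
      else if current_distance < md then
        pvAScan q rest (index + 1) (some current_distance) (some ((index : Int) + 1))
      else pvAScan q rest (index + 1) (some md) band

def find_bands (all_wavelengths : List Int) (required_wavelengths : List (Int × String)) : List (String × Option Int) :=
  ((PySem.Dict.ofList required_wavelengths).keys.foldl (fun required_bands wavelength =>
      required_bands.insert ((PySem.Dict.ofList required_wavelengths).getD wavelength "")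
        (pvAScan wavelength all_wavelengths 0 none none))
    PySem.Dict.empty).items

-- ===== PORT B =====
-- Source B's 'for i in range(1, n)' break loop, iterating the same elements
-- all_wavelengths[1:]; returns the break index k (or n when the loop finishes).
def pvBLoop (q : Int) : Int → Nat → List Int → Nat → Nat
  | _, _, [], n => n
  | run, i, w :: rest, n =>
    let d := |q - w|
    if d > run then i else pvBLoop q (if d < run then d else run) (i + 1) rest n

def pvBBand (wavelength : Int) (all_wavelengths : List Int) : Option Int :=
  let k := match all_wavelengths with
    | [] => all_wavelengths.length  -- loop body never runs on an empty list
    | w0 :: rest => pvBLoop wavelength (|wavelength - w0|) 1 rest all_wavelengths.length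
  -- all_wavelengths[:k] with 0 ≤ k : exact slice
  let head := (all_wavelengths.take k).map (fun w => |wavelength - w|)
  match PySem.List.min? head (fun x => x) with
  | none => none                    -- 'if head else None'
  | some m => some (((PySem.List.index? head m).getD 0 : Int) + 1)  -- min m ∈ head, so index? is never none

def find_bands_alt (all_wavelengths : List Int) (required_wavelengths : List (Int × String)) : List (String × Option Int) :=
  ((PySem.Dict.ofList required_wavelengths).items.foldl (fun result p =>
      result.insert p.2 (pvBBand p.1 all_wavelengths)) PySem.Dict.empty).items

-- ===== PRECONDITION & SPEC =====
def Spec_find_bands (all_wavelengths : List Int) (required_wavelengths : List (Int × String)) (out : List (String × Option Int)) : Prop := out = find_bands_alt all_wavelengths required_wavelengths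
instance (all_wavelengths : List Int) (required_wavelengths : List (Int × String)) (out : List (String × Option Int)) : Decidable (Spec_find_bands all_wavelengths required_wavelengths out) := by unfold Spec_find_bands; infer_instance

-- ===== CLAIM (what is proved, stated in full; the proofs are below) =====
def Claim_equal_find_bands : Prop := ∀ (all_wavelengths : List Int) (required_wavelengths : List (Int × String)), Dom_find_bands all_wavelengths required_wavelengths → Spec_find_bands all_wavelengths required_wavelengths (find_bands all_wavelengths required_wavelengths)

-- ===== LEMMAS AND PROOFS =====

-- proof-side helpers: minimum of a nonempty list, A's band value for a scanned
-- prefix, and the number of elements consumed before the break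
def pvMinF : List Int → Int
  | [] => 0
  | a :: t => t.foldl min a

def pvArgm (pre : List Int) : Int := ((PySem.List.index? pre (pvMinF pre)).getD 0 : Int) + 1

def pvCut : Int → List Int → Nat
  | _, [] => 0
  | run, d :: rest => if d > run then 0 else pvCut (min run d) rest + 1

theorem pvBLoop_eq_cut (q : Int) (rest : List Int) : ∀ (run : Int) (i n : Nat), n = i + rest.length →
    pvBLoop q run i rest n = i + pvCut run (rest.map (fun w => |q - w|)) := by
  induction rest with
  | nil => intro run i n h; simp [pvBLoop, pvCut, h]
  | cons d t ih =>
    intro run i n h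
    simp only [pvBLoop, pvCut, List.map_cons]
    split
    · simp
    · rw [show (if |q - d| < run then |q - d| else run) = min run |q - d| by
          rw [min_def]; split_ifs <;> omega]
      rw [ih (min run (|q - d|)) (i + 1) n (by simp [h, List.length_cons]; omega)]; omega

theorem pvMinF_append (a : Int) (t : List Int) (c : Int) :
    pvMinF ((a :: t) ++ [c]) = min (pvMinF (a :: t)) c := by
  simp [pvMinF, List.foldl_append]

theorem pvMinF_mem (a : Int) (t : List Int) : pvMinF (a :: t) ∈ a :: t := by
  simp only [pvMinF]
  rcases PySem.List.foldl_min_mem t a with h | h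
  · simp [h]
  · exact List.mem_cons_of_mem _ h

theorem pvMinF_le (a : Int) (t : List Int) : ∀ x ∈ a :: t, pvMinF (a :: t) ≤ x := by
  intro x hx
  rcases List.mem_cons.mp hx with rfl | hx
  · exact (PySem.List.foldl_min_le t x).1
  · exact (PySem.List.foldl_min_le t a).2 x hx

theorem idxOf?_append_left (l1 l2 : List Int) (v : Int) (h : v ∈ l1) :
    List.idxOf? v (l1 ++ l2) = List.idxOf? v l1 := by
  unfold List.idxOf?
  rw [List.findIdx?_append]
  have hne : List.findIdx? (fun x => x == v) l1 ≠ none := by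
    intro hc
    rw [List.findIdx?_eq_none_iff] at hc
    simpa using hc v h
  rcases Option.ne_none_iff_exists'.mp hne with ⟨i, hi⟩
  simp [hi]

theorem idxOf?_append_self (l1 : List Int) (v : Int) (h : v ∉ l1) :
    List.idxOf? v (l1 ++ [v]) = some l1.length := by
  unfold List.idxOf?
  rw [List.findIdx?_append]
  have h1 : List.findIdx? (fun x => x == v) l1 = none := by
    rw [List.findIdx?_eq_none_iff]
    intro x hx
    exact beq_eq_false_iff_ne.mpr (fun e => h (e ▸ hx))
  have h2 : List.findIdx? (fun x => x == v) [v] = some 0 := by simp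
  rw [h1, h2]
  simp

theorem pvAScan_cons_some (q w : Int) (rest : List Int) (n : Nat) (md b : Int) :
    pvAScan q (w :: rest) n (some md) (some b) =
    (if |q - w| > md then some b
     else if |q - w| < md then pvAScan q rest (n + 1) (some |q - w|) (some ((n : Int) + 1))
     else pvAScan q rest (n + 1) (some md) (some b)) := rfl

theorem pvCut_cons (run d : Int) (rest : List Int) :
    pvCut run (d :: rest) = if d > run then 0 else pvCut (min run d) rest + 1 := rfl

-- the central invariant: after scanning a nonempty prefix 'pre' of distances, A's
-- state is (min of pre, first argmin of pre), and the final band is the first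
-- argmin of the prefix extended until the break
theorem pvMain (q : Int) (l : List Int) : ∀ (pre : List Int), pre ≠ [] →
    pvAScan q l pre.length (some (pvMinF pre)) (some (pvArgm pre)) =
    some (pvArgm (pre ++ (l.map (fun w => |q - w|)).take (pvCut (pvMinF pre) (l.map (fun w => |q - w|))))) := by
  induction l with
  | nil => intro pre _; simp [pvAScan, pvCut]
  | cons w rest ih =>
    intro pre hne
    obtain ⟨a, t, rfl⟩ := List.exists_cons_of_ne_nil hne
    have hmem : pvMinF (a :: t) ∈ a :: t := pvMinF_mem a t
    have hle : ∀ x ∈ a :: t, pvMinF (a :: t) ≤ x := pvMinF_le a t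
    rw [List.map_cons, pvAScan_cons_some, pvCut_cons]
    split_ifs with h1 h2
    · simp
    · -- strict improvement: c < md
      have hnotmem : |q - w| ∉ a :: t := fun hm => absurd (hle _ hm) (not_le.mpr h2)
      have hmin : pvMinF ((a :: t) ++ [|q - w|]) = |q - w| := by
        rw [pvMinF_append, min_eq_right h2.le]
      have hargm : pvArgm ((a :: t) ++ [|q - w|]) = ((a :: t).length : Int) + 1 := by
        unfold pvArgm
        rw [hmin]
        simp only [PySem.List.index?]
        rw [idxOf?_append_self _ _ hnotmem]
        simp
      have h := ih ((a :: t) ++ [|q - w|]) (by simp)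
      rw [hmin, hargm, List.length_append] at h
      rw [min_eq_right h2.le, List.take_succ_cons,
        show (a :: t) ++ |q - w| :: (List.map (fun w => |q - w|) rest).take
            (pvCut |q - w| (List.map (fun w => |q - w|) rest)) =
          ((a :: t) ++ [|q - w|]) ++ (List.map (fun w => |q - w|) rest).take
            (pvCut |q - w| (List.map (fun w => |q - w|) rest)) by simp]
      simpa using h
    · -- tie: c = md, band kept
      have heq : |q - w| = pvMinF (a :: t) := le_antisymm (not_lt.mp h1) (not_lt.mp h2)
      have hmin : pvMinF ((a :: t) ++ [|q - w|]) = pvMinF (a :: t) := by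
        rw [pvMinF_append, heq, min_self]
      have hargm : pvArgm ((a :: t) ++ [|q - w|]) = pvArgm (a :: t) := by
        unfold pvArgm
        rw [hmin]
        simp only [PySem.List.index?]
        rw [idxOf?_append_left _ _ _ hmem]
      have h := ih ((a :: t) ++ [|q - w|]) (by simp)
      rw [hmin, hargm, List.length_append] at h
      rw [show min (pvMinF (a :: t)) |q - w| = pvMinF (a :: t) by rw [heq, min_self],
        List.take_succ_cons,
        show (a :: t) ++ |q - w| :: (List.map (fun w => |q - w|) rest).take
            (pvCut (pvMinF (a :: t)) (List.map (fun w => |q - w|) rest)) =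
          ((a :: t) ++ [|q - w|]) ++ (List.map (fun w => |q - w|) rest).take
            (pvCut (pvMinF (a :: t)) (List.map (fun w => |q - w|) rest)) by simp]
      simpa using h

theorem pvInner_eq (q : Int) (all : List Int) : pvAScan q all 0 none none = pvBBand q all := by
  cases all with
  | nil => simp [pvAScan, pvBBand, PySem.List.min?]
  | cons w ws =>
    set c := |q - w| with hc
    set X := ws.map (fun w' => |q - w'|) with hX
    have hA : pvAScan q (w :: ws) 0 none none =
        pvAScan q ws 1 (some c) (some 1) := by
      simp [pvAScan, ← hc]
    have hmain := pvMain q ws [c] (by simp)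
    norm_num at hmain
    have hminF : pvMinF [c] = c := rfl
    have hargm : pvArgm [c] = 1 := by
      simp [pvArgm, pvMinF, PySem.List.index?, List.idxOf?]
    rw [hminF, hargm] at hmain
    have hk : pvBLoop q c 1 ws (ws.length + 1) = 1 + pvCut c X := by
      rw [pvBLoop_eq_cut q ws c 1 (ws.length + 1) (by omega)]
    have hhead : ((w :: ws).take (1 + pvCut c X)).map (fun w' => |q - w'|) =
        c :: X.take (pvCut c X) := by
      rw [Nat.add_comm, List.take_succ_cons, List.map_cons, hX, List.map_take]
    unfold pvBBand
    simp only [← hc, List.length_cons, hk, hhead]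
    rw [PySem.List.min?_id_cons]
    have : List.foldl min c (X.take (pvCut c X)) = pvMinF (c :: X.take (pvCut c X)) := rfl
    rw [this]
    rw [hA, hmain]
    simp only [pvArgm]
    rfl

-- ===== VERDICT (by name: the statement is the Claim_ definition above) =====
theorem find_bands_spec : Claim_equal_find_bands := by
  intro all req _
  unfold Spec_find_bands find_bands find_bands_alt
  rw [PySem.Dict.items_eq_map_keys (PySem.Dict.ofList req) (PySem.Dict.nodup_keys_ofList req) ""]
  rw [List.foldl_map]
  refine congrArg PySem.Dict.items ?_
  apply PySem.List.foldl_congr_mem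
  intro acc k _
  simp only []
  rw [pvInner_eq]
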